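-- pv_equiv track=rewrite | github.com/ayhem18/Game_Theory_Programming | GT_programming_Python/assignment_1/positions.py | next_final_positions
-- ===== SOURCE A (Python) =====
-- def next_final_positions(min_position: int, step: int, w_current: set):
--     """This function performs one step in the backward induction: it finds the final positions
--     out of the current final positions
--
--     Args:
--         min_position (int): the minimal position in the valid range
--         step (int): the maximal value of a step
--         w_current (list): the current  final positions
--     """
--     # a range of values including the theoretically possible values
--     # new_pos_final = range(max(min(w_current) - 2 * step, min_position), max(w_current) - 1)
--     new_pos_final = range(max(w_current) - 2, max(min(w_current) - 2 * step, min_position) - 1, -1)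
--     # remove elements that are already final positions
--     new_pos_final = [x for x in new_pos_final if x not in w_current]
--
--     new_final = []  # list to save the new final positions
--
--     # iterate through the new possible final positions
--     for pos in new_pos_final:
--         # iterate through the possible first steps:
--         for i in range(1, step + 1):
--             # proceed only if the intermediate position is not a final position
--             if pos + i not in w_current:
--                 add = True  # a flag to know whether to add the position or not.
--
--                 # check that all moves the 2nd player make would put the first player in a winning position
--                 for j in range(1, step + 1):
--                     if pos + i + j not in w_current:
--                         # if this condition is false, this means that the second player can put the first player
--                         # in a non-final position
--                         add = False
--                         break
--
--                 if add:
--                     new_final.append(pos)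
--                     # the existence of a single "i" is sufficient, break form the loop
--                     break
--     return new_final
-- ===== SOURCE B (Python) =====
-- def next_final_positions(min_position: int, step: int, w_current: set):
--     """Prefix-count re-implementation: O(R + step) instead of A's nested scans."""
--     s = set(w_current)
--     hi = max(w_current) - 2
--     lo = max(min(w_current) - 2 * step, min_position)
--     if step <= 0 or hi < lo:
--         return []
--     size = hi + 2 * step - lo + 1
--     mem = [1 if lo + k in s else 0 for k in range(size)]
--     pref = [0]
--     run = 0
--     for v in mem:
--         run += v
--         pref.append(run)
--     good = [1 if mem[k] == 0 and pref[k + step + 1] - pref[k + 1] == step else 0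
--             for k in range(hi + step - lo + 1)]
--     gpref = [0]
--     grun = 0
--     for v in good:
--         grun += v
--         gpref.append(grun)
--     return [lo + k for k in range(hi - lo, -1, -1)
--             if mem[k] == 0 and gpref[k + step + 1] - gpref[k + 1] > 0]
-- ===== Notes on version B (the rewrite author's own statement) =====
-- stated objective: faster
-- what changed: A decides each candidate with nested scans over all first/second moves; B precomputes 0/1 membership over the candidate integer range and two prefix-count tables, so every window test ('all step successors final', 'some winning reply exists') is an O(1) prefix difference.
import Mathlib
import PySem

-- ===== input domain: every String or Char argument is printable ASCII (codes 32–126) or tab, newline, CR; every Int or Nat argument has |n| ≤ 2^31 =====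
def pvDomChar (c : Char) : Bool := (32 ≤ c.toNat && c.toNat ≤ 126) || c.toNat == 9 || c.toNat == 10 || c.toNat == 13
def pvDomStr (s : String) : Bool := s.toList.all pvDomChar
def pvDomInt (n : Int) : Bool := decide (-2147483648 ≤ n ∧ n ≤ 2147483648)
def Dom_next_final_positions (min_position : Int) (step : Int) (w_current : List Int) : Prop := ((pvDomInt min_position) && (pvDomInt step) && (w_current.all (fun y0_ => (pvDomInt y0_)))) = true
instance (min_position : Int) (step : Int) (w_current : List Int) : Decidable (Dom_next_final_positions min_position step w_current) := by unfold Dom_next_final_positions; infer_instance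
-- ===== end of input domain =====

-- B replaces A's nested membership scans by precomputed prefix counts over the candidate
-- integer range, answering each window query in O(1) (objective: faster).


-- ===== PORT A =====
-- inner `for j in range(1, step+1)` loop: sets add=False and breaks on the first miss
def pvLoopJ (w : List Int) (base : Int) : List Int → Bool
  | [] => true
  | j :: js => if !(decide ((base + j) ∈ w)) then false else pvLoopJ w base js

-- `for i in range(1, step+1)` loop: returns whether pos was appended (append then break)
def pvLoopI (w : List Int) (step pos : Int) : List Int → Bool
  | [] => false
  | i :: is =>
    if !(decide ((pos + i) ∈ w)) then
      if pvLoopJ w (pos + i) (PySem.List.pyRange 1 (step + 1) 1) then true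
      else pvLoopI w step pos is
    else pvLoopI w step pos is

def next_final_positions (min_position : Int) (step : Int) (w_current : List Int) : List Int :=
  match PySem.List.max? w_current (fun x => x), PySem.List.min? w_current (fun x => x) with
  | some mx, some mn =>
    let new_pos_final := (PySem.List.pyRange (mx - 2) (max (mn - 2 * step) min_position - 1) (-1)).filter
        (fun x => !(decide (x ∈ w_current)))
    -- `new_final = []` with `new_final.append(pos)`: a growing Python list is an Array
    (new_pos_final.foldl (fun (acc : Array Int) pos =>
        if pvLoopI w_current step pos (PySem.List.pyRange 1 (step + 1) 1) then acc.push pos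
        else acc) #[]).toList
  | _, _ => []  -- max()/min() of an empty iterable raise ValueError: excluded by Pre_

-- ===== PORT B =====
-- list indexing l[i]: Source B only ever indexes in range with a nonnegative index, where this is exact
def pvIdxA (a : Array Int) (i : Int) : Int := a.getD i.toNat 0

-- the `pref = [0]; run = 0; for v in vs: run += v; pref.append(run)` accumulation loop of Source B
-- (an appended-to Python list is an Array; used for both `pref` and `gpref`)
def pvScanA (vs : List Int) : Array Int × Int :=
  vs.foldl (fun p v => (p.1.push (p.2 + v), p.2 + v)) (#[0], 0)

-- Source B's `mem = [1 if lo + k in s else 0 for k in range(size)]`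
def pvMemL (w : List Int) (lo size : Int) : List Int :=
  (PySem.List.pyRange 0 size 1).map (fun k => if (lo + k) ∈ PySem.Set.ofList w then (1 : Int) else 0)

-- Source B's `good = [...]` comprehension (gl = hi + step - lo + 1), reading mem and pref
def pvGoodLst (w : List Int) (lo size step gl : Int) : List Int :=
  let memA := (pvMemL w lo size).toArray
  let prefA := (pvScanA (pvMemL w lo size)).1
  (PySem.List.pyRange 0 gl 1).map (fun k =>
    if pvIdxA memA k = 0 ∧ pvIdxA prefA (k + step + 1) - pvIdxA prefA (k + 1) = step
    then (1 : Int) else 0)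

def next_final_positions_alt (min_position : Int) (step : Int) (w_current : List Int) : List Int :=
  match PySem.List.max? w_current (fun x => x) with
  | none => []  -- unreachable under Pre_: max() of an empty iterable raises
  | some mx =>
  match PySem.List.min? w_current (fun x => x) with
  | none => []
  | some mn =>
    let hi := mx - 2
    let lo := max (mn - 2 * step) min_position
    if step ≤ 0 ∨ hi < lo then []
    else
      let size := hi + 2 * step - lo + 1
      let gl := hi + step - lo + 1
      let memA := (pvMemL w_current lo size).toArray
      let gprefA := (pvScanA (pvGoodLst w_current lo size step gl)).1
      ((PySem.List.pyRange (hi - lo) (-1) (-1)).filter (fun k =>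
          decide (pvIdxA memA k = 0) &&
          decide (pvIdxA gprefA (k + step + 1) - pvIdxA gprefA (k + 1) > 0))).map (fun k => lo + k)

-- ===== PRECONDITION & SPEC =====
-- Pre_ excludes only the empty list, on which A's max()/min() raise ValueError.
def Pre_next_final_positions (min_position : Int) (step : Int) (w_current : List Int) : Prop := w_current ≠ []
instance (min_position : Int) (step : Int) (w_current : List Int) : Decidable (Pre_next_final_positions min_position step w_current) := by unfold Pre_next_final_positions; infer_instance
def pvWitness_next_final_positions : Int × Int × List Int := (0, 2, [5, 6])

def Spec_next_final_positions (min_position : Int) (step : Int) (w_current : List Int) (out : List Int) : Prop := out = next_final_positions_alt min_position step w_current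
instance (min_position : Int) (step : Int) (w_current : List Int) (out : List Int) : Decidable (Spec_next_final_positions min_position step w_current out) := by unfold Spec_next_final_positions; infer_instance

-- ===== CLAIM (what is proved, stated in full; the proofs are below) =====
def Claim_equal_next_final_positions : Prop := ∀ (min_position : Int) (step : Int) (w_current : List Int), Dom_next_final_positions min_position step w_current → Pre_next_final_positions min_position step w_current → Spec_next_final_positions min_position step w_current (next_final_positions min_position step w_current)

-- ===== LEMMAS AND PROOFS =====

-- the common characterisation both ports are reduced to
def pvAll (w : List Int) (step t : Int) : Bool :=
  (PySem.List.pyRange 1 (step + 1) 1).all (fun j => decide ((t + j) ∈ w))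
def pvGood (w : List Int) (step t : Int) : Bool := !(decide (t ∈ w)) && pvAll w step t
def pvF (w : List Int) (step pos : Int) : Bool :=
  (PySem.List.pyRange 1 (step + 1) 1).any (fun i => pvGood w step (pos + i))

-- list-level mirrors of B's helpers (proof-only)
def pvIdx (l : List Int) (i : Int) : Int := PySem.List.pyGetD l i 0
def pvScan (vs : List Int) : List Int × Int :=
  vs.foldl (fun p v => (p.1 ++ [p.2 + v], p.2 + v)) ([0], 0)
def pvPrefL (w : List Int) (lo size : Int) : List Int := (pvScan (pvMemL w lo size)).1
def pvGoodL (w : List Int) (lo size step gl : Int) : List Int :=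
  (PySem.List.pyRange 0 gl 1).map (fun k =>
    if pvIdx (pvMemL w lo size) k = 0 ∧
       pvIdx (pvPrefL w lo size) (k + step + 1) - pvIdx (pvPrefL w lo size) (k + 1) = step
    then (1 : Int) else 0)
def pvGPrefL (w : List Int) (lo size step gl : Int) : List Int := (pvScan (pvGoodL w lo size step gl)).1

theorem pvLoopJ_eq (w : List Int) (base : Int) (js : List Int) :
    pvLoopJ w base js = js.all (fun j => decide ((base + j) ∈ w)) := by
  induction js with
  | nil => rfl
  | cons j js ih => by_cases h : (base + j) ∈ w <;> simp [pvLoopJ, h, ih]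

theorem pvLoopI_eq (w : List Int) (step pos : Int) (is : List Int) :
    pvLoopI w step pos is = is.any (fun i => pvGood w step (pos + i)) := by
  induction is with
  | nil => rfl
  | cons i is ih =>
    rw [pvLoopI, ih, pvLoopJ_eq, List.any_cons]
    cases hd : decide ((pos + i) ∈ w) <;>
      cases hj : (PySem.List.pyRange 1 (step + 1) 1).all (fun j => decide ((pos + i + j) ∈ w)) <;>
        simp only [pvGood, pvAll, hd, hj, Bool.not_true, Bool.not_false,
          Bool.and_false, Bool.and_true, Bool.false_or] <;>
        simp

theorem foldl_push_filter (p : Int → Bool) (l : List Int) : ∀ (a : Array Int),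
    (l.foldl (fun acc x => if p x then acc.push x else acc) a).toList = a.toList ++ l.filter p := by
  induction l with
  | nil => intro a; simp
  | cons x l ih =>
    intro a
    rw [List.foldl_cons]
    cases h : p x <;> simp [h, ih]

theorem A_eq (min_position step : Int) (w : List Int) (mx mn : Int)
    (hmx : PySem.List.max? w (fun x => x) = some mx)
    (hmn : PySem.List.min? w (fun x => x) = some mn) :
    next_final_positions min_position step w =
      (PySem.List.pyRange (mx - 2) (max (mn - 2 * step) min_position - 1) (-1)).filter
        (fun pos => !(decide (pos ∈ w)) && pvF w step pos) := by
  unfold next_final_positions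
  rw [hmx, hmn]
  simp only
  rw [foldl_push_filter (fun pos => pvLoopI w step pos (PySem.List.pyRange 1 (step + 1) 1)),
      List.filter_filter]
  simp only [List.toList_toArray, List.nil_append]
  refine List.filter_congr ?_
  intro pos _
  rw [pvLoopI_eq, Bool.and_comm]
  rfl

theorem pvScan_go (vs : List Int) : ∀ (acc : List Int) (r : Int),
    vs.foldl (fun p v => (p.1 ++ [p.2 + v], p.2 + v)) (acc, r)
      = (acc ++ (List.range vs.length).map (fun n => r + (vs.take (n + 1)).sum), r + vs.sum) := by
  induction vs with
  | nil => intro acc r; simp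
  | cons v vs ih =>
    intro acc r
    rw [List.foldl_cons, ih]
    refine Prod.ext ?_ (by simp; ring)
    simp only [List.length_cons, List.range_succ_eq_map, List.map_cons, List.map_map]
    simp [Function.comp, List.take_succ_cons, List.append_assoc]
    intro a _
    ring

theorem pvScan_fst (vs : List Int) :
    (pvScan vs).1 = 0 :: (List.range vs.length).map (fun n => (vs.take (n + 1)).sum) := by
  unfold pvScan
  rw [pvScan_go]
  simp

theorem pvScanA_go (vs : List Int) : ∀ (a : Array Int) (r : Int),
    ((vs.foldl (fun p v => (p.1.push (p.2 + v), p.2 + v)) (a, r)).1.toList,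
     (vs.foldl (fun p v => (p.1.push (p.2 + v), p.2 + v)) (a, r)).2)
      = vs.foldl (fun p v => (p.1 ++ [p.2 + v], p.2 + v)) (a.toList, r) := by
  induction vs with
  | nil => intro a r; simp
  | cons v vs ih =>
    intro a r
    rw [List.foldl_cons, List.foldl_cons, ih]
    simp

theorem pvScanA_fst (vs : List Int) : (pvScanA vs).1.toList = (pvScan vs).1 := by
  have h := pvScanA_go vs #[0] 0
  unfold pvScanA pvScan
  have := congrArg Prod.fst h
  simpa using this

theorem pvIdxA_eq (a : Array Int) (i : Int) (h : 0 ≤ i) : pvIdxA a i = pvIdx a.toList i := by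
  rw [pvIdxA, pvIdx, show i = ((i.toNat : Nat) : Int) by omega, PySem.List.pyGetD_natCast,
      Array.getD_eq_getD_getElem?, List.getD_eq_getElem?_getD, Array.getElem?_toList,
      Int.toNat_natCast]

theorem pvGoodLst_eq (w : List Int) (lo size step gl : Int) (hstep : 0 ≤ step) :
    pvGoodLst w lo size step gl = pvGoodL w lo size step gl := by
  unfold pvGoodLst pvGoodL
  refine List.map_congr_left ?_
  intro k hk
  rw [PySem.List.mem_pyRange_one] at hk
  rw [pvIdxA_eq _ _ (by omega), pvIdxA_eq _ _ (by omega), pvIdxA_eq _ _ (by omega),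
      List.toList_toArray, pvScanA_fst]
  rfl

theorem pvIdx_scan (vs : List Int) (k : Int) (h0 : 0 ≤ k) (h1 : k ≤ (vs.length : Int)) :
    pvIdx (pvScan vs).1 k = (vs.take k.toNat).sum := by
  rw [pvIdx, pvScan_fst, PySem.List.pyGetD_eq_getElem _ 0 h0 (by simp; omega)]
  rw [← Option.some_inj, ← List.getElem?_eq_getElem]
  cases hnk : k.toNat with
  | zero => simp
  | succ m =>
    have hm : m < vs.length := by omega
    simp [hm]

theorem pvScan_window (vs : List Int) (a b : Int) (h0 : 0 ≤ a) (hab : a ≤ b)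
    (hb : b ≤ (vs.length : Int)) :
    pvIdx (pvScan vs).1 b - pvIdx (pvScan vs).1 a = ((vs.drop a.toNat).take (b.toNat - a.toNat)).sum := by
  have h : vs.take b.toNat = vs.take a.toNat ++ (vs.drop a.toNat).take (b.toNat - a.toNat) := by
    rw [← List.take_add]
    congr 1
    omega
  rw [pvIdx_scan vs a h0 (by omega), pvIdx_scan vs b (by omega) hb, h, List.sum_append]
  ring

theorem map_pyRange_window (f : Int → Int) (n a b : Int) (h0 : 0 ≤ a) (hab : a ≤ b) (hbn : b ≤ n) :
    (((PySem.List.pyRange 0 n 1).map f).drop a.toNat).take (b.toNat - a.toNat)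
      = (PySem.List.pyRange a b 1).map f := by
  rw [PySem.List.pyRange_one_append 0 a n h0 (by omega),
      PySem.List.pyRange_one_append a b n hab hbn, List.map_append, List.map_append]
  have hA : ((PySem.List.pyRange 0 a 1).map f).length = a.toNat := by
    simp [PySem.List.length_pyRange_one]
  have hB : ((PySem.List.pyRange a b 1).map f).length = b.toNat - a.toNat := by
    simp [PySem.List.length_pyRange_one]; omega
  have hd : ((((PySem.List.pyRange 0 a 1).map f) ++ (((PySem.List.pyRange a b 1).map f) ++ ((PySem.List.pyRange b n 1).map f))).drop a.toNat)
      = ((PySem.List.pyRange a b 1).map f) ++ ((PySem.List.pyRange b n 1).map f) := by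
    rw [← hA, List.drop_left]
  rw [hd]
  have ht : ((((PySem.List.pyRange a b 1).map f) ++ ((PySem.List.pyRange b n 1).map f)).take (b.toNat - a.toNat))
      = ((PySem.List.pyRange a b 1).map f) := by
    rw [← hB, List.take_left]
  rw [ht]

theorem sum_map_ite_prop (p : Int → Prop) [DecidablePred p] (xs : List Int) :
    (xs.map (fun x => if p x then (1 : Int) else 0)).sum
      = (xs.countP (fun x => decide (p x)) : Int) := by
  rw [← PySem.List.sum_map_ite_one_zero (fun x => decide (p x)) xs]
  congr 1
  refine List.map_congr_left ?_
  intro x _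
  by_cases h : p x <;> simp [h]

theorem window_shift_all (P : Int → Prop) (k step : Int) :
    (∀ t ∈ PySem.List.pyRange (k + 1) (k + step + 1) 1, P t)
      ↔ (∀ j ∈ PySem.List.pyRange 1 (step + 1) 1, P (k + j)) := by
  simp only [PySem.List.mem_pyRange_one]
  constructor
  · intro h j hj; exact h (k + j) (by omega)
  · intro h t ht
    have := h (t - k) (by omega)
    have e : k + (t - k) = t := by omega
    rwa [e] at this

theorem window_shift_any (P : Int → Prop) (k step : Int) :
    (∃ t ∈ PySem.List.pyRange (k + 1) (k + step + 1) 1, P t)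
      ↔ (∃ j ∈ PySem.List.pyRange 1 (step + 1) 1, P (k + j)) := by
  simp only [PySem.List.mem_pyRange_one]
  constructor
  · rintro ⟨t, ht, hp⟩
    refine ⟨t - k, by omega, ?_⟩
    have e : k + (t - k) = t := by omega
    rwa [e]
  · rintro ⟨j, hj, hp⟩
    exact ⟨k + j, by omega, hp⟩

theorem B_main (w : List Int) (step lo hi : Int) (h1 : 1 ≤ step) (h2 : lo ≤ hi) :
    ((PySem.List.pyRange (hi - lo) (-1) (-1)).filter (fun k =>
        decide (pvIdxA ((pvMemL w lo (hi + 2 * step - lo + 1)).toArray) k = 0) &&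
        decide (pvIdxA ((pvScanA (pvGoodLst w lo (hi + 2 * step - lo + 1) step (hi + step - lo + 1))).1) (k + step + 1) -
                pvIdxA ((pvScanA (pvGoodLst w lo (hi + 2 * step - lo + 1) step (hi + step - lo + 1))).1) (k + 1) > 0))).map
        (fun k => lo + k)
      = (PySem.List.pyRange hi (lo - 1) (-1)).filter
          (fun pos => !(decide (pos ∈ w)) && pvF w step pos) := by
  set size := hi + 2 * step - lo + 1 with hsize
  set gl := hi + step - lo + 1 with hgl
  have hlenmem : ((pvMemL w lo size).length : Int) = size := by
    simp [pvMemL, PySem.List.length_pyRange_one]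
    omega
  have hmem : ∀ k : Int, 0 ≤ k → k < size →
      pvIdx (pvMemL w lo size) k = (if (lo + k) ∈ w then 1 else 0) := by
    intro k hk0 hk1
    rw [pvIdx, pvMemL, PySem.List.pyGetD_map_pyRange_of_nonneg _ size k 0 hk0 hk1]
    simp [PySem.Set.mem_ofList]
  have hprefwin : ∀ a b : Int, 0 ≤ a → a ≤ b → b ≤ size →
      pvIdx (pvPrefL w lo size) b - pvIdx (pvPrefL w lo size) a
        = ((PySem.List.pyRange a b 1).countP (fun t => decide ((lo + t) ∈ PySem.Set.ofList w)) : Int) := by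
    intro a b ha hab hb
    rw [pvPrefL, pvScan_window _ a b ha hab (by rw [hlenmem]; omega), pvMemL,
        map_pyRange_window _ size a b ha hab hb, sum_map_ite_prop]
  have hcond : ∀ t : Int, 0 ≤ t → t < gl →
      ((pvIdx (pvMemL w lo size) t = 0 ∧
        pvIdx (pvPrefL w lo size) (t + step + 1) - pvIdx (pvPrefL w lo size) (t + 1) = step)
       ↔ pvGood w step (lo + t) = true) := by
    intro t ht0 ht1
    have e1 : (pvIdx (pvMemL w lo size) t = 0) ↔ ¬ ((lo + t) ∈ w) := by
      rw [hmem t ht0 (by omega)]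
      by_cases h : (lo + t) ∈ w <;> simp [h]
    have hAll_iff : (pvAll w step (lo + t) = true)
        ↔ (∀ u ∈ PySem.List.pyRange (t + 1) (t + step + 1) 1, (lo + u) ∈ PySem.Set.ofList w) := by
      rw [window_shift_all]
      simp [pvAll, PySem.Set.mem_ofList, add_assoc]
    have e2 : (pvIdx (pvPrefL w lo size) (t + step + 1) - pvIdx (pvPrefL w lo size) (t + 1) = step)
        ↔ (pvAll w step (lo + t) = true) := by
      rw [hprefwin (t + 1) (t + step + 1) (by omega) (by omega) (by omega), hAll_iff]
      have hlen : (PySem.List.pyRange (t + 1) (t + step + 1) 1).length = step.toNat := by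
        rw [PySem.List.length_pyRange_one]
        omega
      have hle := List.countP_le_length
        (p := fun u => decide ((lo + u) ∈ PySem.Set.ofList w))
        (l := PySem.List.pyRange (t + 1) (t + step + 1) 1)
      constructor
      · intro h
        have := List.countP_eq_length.mp (by omega :
          (PySem.List.pyRange (t + 1) (t + step + 1) 1).countP
            (fun u => decide ((lo + u) ∈ PySem.Set.ofList w))
          = (PySem.List.pyRange (t + 1) (t + step + 1) 1).length)
        intro u hu
        simpa using this u hu
      · intro h
        have := (List.countP_eq_length
          (p := fun u => decide ((lo + u) ∈ PySem.Set.ofList w))).mpr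
          (by intro u hu; simpa using h u hu)
        omega
    rw [pvGood, Bool.and_eq_true, Bool.not_eq_true', decide_eq_false_iff_not]
    exact and_congr e1 e2
  have hlengood : ((pvGoodL w lo size step gl).length : Int) = gl := by
    simp [pvGoodL, PySem.List.length_pyRange_one]
    omega
  have hgoodmap : ∀ a b : Int, 0 ≤ a → a ≤ b → b ≤ gl →
      ((pvGoodL w lo size step gl).drop a.toNat).take (b.toNat - a.toNat)
        = (PySem.List.pyRange a b 1).map
            (fun t => if pvGood w step (lo + t) = true then (1 : Int) else 0) := by
    intro a b ha hab hb
    rw [pvGoodL, map_pyRange_window _ gl a b ha hab hb]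
    refine List.map_congr_left ?_
    intro t ht
    rw [PySem.List.mem_pyRange_one] at ht
    exact if_congr (hcond t (by omega) (by omega)) rfl rfl
  have hgwin : ∀ k : Int, 0 ≤ k → k ≤ hi - lo →
      ((pvIdx (pvGPrefL w lo size step gl) (k + step + 1) -
        pvIdx (pvGPrefL w lo size step gl) (k + 1) > 0)
       ↔ pvF w step (lo + k) = true) := by
    intro k hk0 hk1
    rw [pvGPrefL, pvScan_window _ (k + 1) (k + step + 1) (by omega) (by omega)
          (by rw [hlengood]; omega),
        hgoodmap (k + 1) (k + step + 1) (by omega) (by omega) (by omega),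
        sum_map_ite_prop]
    rw [pvF, List.any_eq_true]
    have : (0 : Int) < ((PySem.List.pyRange (k + 1) (k + step + 1) 1).countP
        (fun t => decide (pvGood w step (lo + t) = true)) : Int)
        ↔ ∃ u ∈ PySem.List.pyRange (k + 1) (k + step + 1) 1, pvGood w step (lo + u) = true := by
      rw [Int.natCast_pos, List.countP_pos_iff]
      simp
    rw [gt_iff_lt, this, window_shift_any (fun u => pvGood w step (lo + u) = true) k step]
    simp [add_assoc]
  have hrange : PySem.List.pyRange hi (lo - 1) (-1)
      = (PySem.List.pyRange (hi - lo) (-1) (-1)).map (fun k => lo + k) := by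
    rw [PySem.List.pyRange_neg_one, PySem.List.pyRange_neg_one, List.map_map]
    have e : (hi - (lo - 1)).toNat = (hi - lo - (-1)).toNat := by omega
    rw [e]
    refine List.map_congr_left ?_
    intro n _
    simp only [Function.comp]
    omega
  rw [hrange, List.filter_map]
  congr 1
  refine List.filter_congr ?_
  intro k hk
  rw [PySem.List.mem_pyRange_neg_one] at hk
  simp only [Function.comp]
  rw [pvIdxA_eq _ _ (by omega), pvIdxA_eq _ _ (by omega), pvIdxA_eq _ _ (by omega),
      List.toList_toArray, pvScanA_fst, pvGoodLst_eq w lo size step gl (by omega)]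
  rw [Bool.eq_iff_iff]
  simp only [Bool.and_eq_true, decide_eq_true_eq, Bool.not_eq_true', decide_eq_false_iff_not]
  have hg : (pvScan (pvGoodL w lo size step gl)).1 = pvGPrefL w lo size step gl := rfl
  rw [hg]
  constructor
  · rintro ⟨hm, hgt⟩
    have := hmem k (by omega) (by omega)
    rw [this] at hm
    constructor
    · by_cases h : (lo + k) ∈ w
      · simp [h] at hm
      · exact h
    · exact (hgwin k (by omega) (by omega)).mp hgt
  · rintro ⟨hm, hgt⟩
    refine ⟨?_, (hgwin k (by omega) (by omega)).mpr hgt⟩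
    rw [hmem k (by omega) (by omega)]
    simp [hm]

theorem B_eq (min_position step : Int) (w : List Int) (mx mn : Int)
    (hmx : PySem.List.max? w (fun x => x) = some mx)
    (hmn : PySem.List.min? w (fun x => x) = some mn) :
    next_final_positions_alt min_position step w =
      (PySem.List.pyRange (mx - 2) (max (mn - 2 * step) min_position - 1) (-1)).filter
        (fun pos => !(decide (pos ∈ w)) && pvF w step pos) := by
  unfold next_final_positions_alt
  rw [hmx, hmn]
  simp only
  by_cases hc : step ≤ 0 ∨ mx - 2 < max (mn - 2 * step) min_position
  · rw [if_pos hc]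
    rcases hc with hstep | hlh
    · have hF : ∀ pos, (!(decide (pos ∈ w)) && pvF w step pos) = false := by
        intro pos
        simp [pvF, PySem.List.pyRange_one_eq_nil (by omega : step + 1 ≤ 1)]
      simp [hF]
    · rw [PySem.List.pyRange_neg_one_eq_nil (by omega)]
      rfl
  · rw [if_neg hc]
    have hs : ¬ step ≤ 0 := fun h => hc (Or.inl h)
    have hl : ¬ mx - 2 < max (mn - 2 * step) min_position := fun h => hc (Or.inr h)
    exact B_main w step (max (mn - 2 * step) min_position) (mx - 2) (by omega) (by omega)

-- ===== VERDICT (by name: the statement is the Claim_ definition above) =====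
theorem next_final_positions_spec : Claim_equal_next_final_positions := by
  intro min_position step w _hdom hpre
  unfold Spec_next_final_positions
  obtain ⟨mx, hmx⟩ : ∃ mx, PySem.List.max? w (fun x => x) = some mx := by
    cases h : PySem.List.max? w (fun x => x) with
    | none => exact absurd ((PySem.List.max?_eq_none_iff w (fun x => x)).mp h) hpre
    | some m => exact ⟨m, rfl⟩
  obtain ⟨mn, hmn⟩ : ∃ mn, PySem.List.min? w (fun x => x) = some mn := by
    cases h : PySem.List.min? w (fun x => x) with
    | none => exact absurd ((PySem.List.min?_eq_none_iff w (fun x => x)).mp h) hpre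
    | some m => exact ⟨m, rfl⟩
  rw [A_eq min_position step w mx mn hmx hmn, B_eq min_position step w mx mn hmx hmn]
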